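-- pv_equiv track=rewrite | github.com/NOIZYLAB-io/NOIZYLAB | Audio_Registry/tools/audit/run_audit.py | decade_distribution
-- ===== SOURCE A (Python) =====
-- from collections import defaultdict
--
-- def decade_distribution(items):
--     """Count items by decade."""
--     decades = defaultdict(int)
--     for item in items:
--         year = item.get("releaseYear")
--         if year:
--             decade = f"{(year // 10) * 10}s"
--             decades[decade] += 1
--     return dict(sorted(decades.items()))
-- ===== SOURCE B (Python) =====
-- from itertools import groupby
--
-- def decade_distribution(items):
--     """Count items by decade."""
--     labels = sorted(
--         f"{(year // 10) * 10}s"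
--         for year in (item.get("releaseYear") for item in items)
--         if year
--     )
--     return {k: sum(1 for _ in g) for k, g in groupby(labels)}
-- ===== Notes on version B (the rewrite author's own statement) =====
-- stated objective: alternative
-- what changed: Replaces the dict-counting loop followed by sorting of (key,count) pairs with collecting all decade labels, sorting the label list, and counting run lengths with itertools.groupby.
import Mathlib
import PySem

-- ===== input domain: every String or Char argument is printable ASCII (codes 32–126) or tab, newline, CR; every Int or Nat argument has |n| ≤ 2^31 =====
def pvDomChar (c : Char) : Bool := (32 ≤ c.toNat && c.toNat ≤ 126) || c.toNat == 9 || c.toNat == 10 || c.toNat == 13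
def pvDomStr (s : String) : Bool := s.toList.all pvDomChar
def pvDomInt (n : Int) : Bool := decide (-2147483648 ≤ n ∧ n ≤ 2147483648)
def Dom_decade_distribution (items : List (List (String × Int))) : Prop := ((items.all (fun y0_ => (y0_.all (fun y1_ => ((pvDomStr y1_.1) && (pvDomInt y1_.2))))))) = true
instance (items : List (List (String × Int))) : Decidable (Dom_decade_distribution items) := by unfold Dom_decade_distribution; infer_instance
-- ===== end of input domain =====

-- B collects every decade label, sorts the labels, and counts run lengths (groupby),
-- instead of A's dict-counting loop followed by sorting the (key, count) pairs; alternative decomposition, same results.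


-- ===== PORT A =====
-- f"{(year // 10) * 10}s"  (shared literally by both Python sources)
def decadeKey (year : Int) : String := PySem.Int.toStr (PySem.Int.floordiv year 10 * 10) ++ "s"

-- the body of A's for-loop: item.get("releaseYear"); if year: decades[decade] += 1
def stepA (d : PySem.Dict String Int) (item : List (String × Int)) : PySem.Dict String Int :=
  match (PySem.Dict.mk item).get? "releaseYear" with
  | some year => if year ≠ 0 then d.modify (decadeKey year) 0 (· + 1) else d
  | none => d

def decade_distribution (items : List (List (String × Int))) : List (String × Int) :=
  let decades := items.foldl stepA PySem.Dict.empty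
  PySem.List.sorted2 decades.items (·.1) (·.2) false

-- ===== PORT B =====
-- the generator: item.get("releaseYear") for each item, kept if truthy, mapped to its label
def extractB (item : List (String × Int)) : Option String :=
  match (PySem.Dict.mk item).get? "releaseYear" with
  | some year => if year ≠ 0 then some (decadeKey year) else none
  | none => none

-- itertools.groupby on the sorted label list: one pair (key, run length) per run
def groupRuns : List String → List (String × Int)
  | [] => []
  | x :: xs =>
      (x, 1 + ((xs.takeWhile (fun y => y == x)).length : Int)) ::
        groupRuns (xs.dropWhile (fun y => y == x))
termination_by l => l.length
decreasing_by
  exact Nat.lt_succ_of_le (List.length_dropWhile_le _ _)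

def decade_distribution_alt (items : List (List (String × Int))) : List (String × Int) :=
  let labels := PySem.List.sorted (items.filterMap extractB) (fun x => x) false
  groupRuns labels

-- ===== PRECONDITION & SPEC =====
def Spec_decade_distribution (items : List (List (String × Int))) (out : List (String × Int)) : Prop := out = decade_distribution_alt items
instance (items : List (List (String × Int))) (out : List (String × Int)) : Decidable (Spec_decade_distribution items out) := by unfold Spec_decade_distribution; infer_instance

-- ===== CLAIM (what is proved, stated in full; the proofs are below) =====
def Claim_equal_decade_distribution : Prop := ∀ (items : List (List (String × Int))), Dom_decade_distribution items → Spec_decade_distribution items (decade_distribution items)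

-- ===== LEMMAS AND PROOFS =====

-- the canonical result both programs compute: for each distinct label, in sorted label
-- order, the pair (label, its multiplicity in the label list)
def canonical (L : List String) : List (String × Int) :=
  (PySem.List.sorted (PySem.Set.ofList L) (fun x => x) false).map (fun k => (k, (L.count k : Int)))

-- A's loop over the items is the Counter of the extracted labels
lemma foldA_eq_counter (items : List (List (String × Int))) (d : PySem.Dict String Int) :
    items.foldl stepA d = (items.filterMap extractB).foldl (fun d x => d.modify x 0 (· + 1)) d := by
  induction items generalizing d with
  | nil => rfl
  | cons it rest ih =>
      simp only [List.foldl_cons, List.filterMap_cons]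
      cases hg : (PySem.Dict.mk it).get? "releaseYear" with
      | none =>
          rw [show stepA d it = d from by simp [stepA, hg],
            show extractB it = none from by simp [extractB, hg]]
          exact ih d
      | some y =>
          by_cases hy : y = 0
          · rw [show stepA d it = d from by simp [stepA, hg, hy],
              show extractB it = none from by simp [extractB, hg, hy]]
            exact ih d
          · rw [show stepA d it = d.modify (decadeKey y) 0 (· + 1) from by simp [stepA, hg, hy],
              show extractB it = some (decadeKey y) from by simp [extractB, hg, hy]]
            exact ih _

-- insertBy only looks at the comparator on the inserted element vs list members
lemma insertBy_congr_mem {α : Type} (f g : α → α → Bool) (a : α) (ys : List α)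
    (h : ∀ b ∈ ys, f a b = g a b) :
    PySem.List.insertBy f a ys = PySem.List.insertBy g a ys := by
  induction ys with
  | nil => rfl
  | cons b bs ih =>
      simp only [PySem.List.insertBy]
      rw [h b (by simp)]
      by_cases hb : g a b = true
      · simp [hb]
      · simp only [hb, Bool.false_eq_true, if_false]
        rw [ih (fun c hc => h c (by simp [hc]))]

-- an insertion sort with two comparators agreeing on the input's elements
lemma foldl_insertBy_congr {α : Type} (f g : α → α → Bool) (S : List α)
    (hfg : ∀ a ∈ S, ∀ b ∈ S, f a b = g a b) :
    ∀ (xs acc : List α), (∀ x ∈ xs, x ∈ S) → (∀ x ∈ acc, x ∈ S) →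
      xs.foldl (fun acc x => PySem.List.insertBy f x acc) acc
        = xs.foldl (fun acc x => PySem.List.insertBy g x acc) acc := by
  intro xs
  induction xs with
  | nil => intro acc _ _; rfl
  | cons x rest ih =>
      intro acc hxs hacc
      simp only [List.foldl_cons]
      rw [insertBy_congr_mem f g x acc (fun b hb => hfg x (hxs x (by simp)) b (hacc b hb))]
      exact ih _ (fun z hz => hxs z (by simp [hz]))
        (fun z hz => by
          rcases (PySem.List.mem_insertBy g x z acc).1 hz with h | h
          · exact h ▸ hxs x (by simp)
          · exact hacc z h)

-- sorted2 (tuple comparison) agrees with sorted-by-first-component when the first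
-- components determine the elements
lemma sorted2_eq_sorted_fst (xs : List (String × Int))
    (h : ∀ a ∈ xs, ∀ b ∈ xs, a.1 = b.1 → a = b) :
    PySem.List.sorted2 xs (·.1) (·.2) false = PySem.List.sorted xs (·.1) false := by
  rw [PySem.List.sorted_eq_foldl_insertBy]
  show xs.foldl (fun acc x => PySem.List.insertBy _ x acc) [] = _
  exact foldl_insertBy_congr _ _ xs
    (by
      intro a ha b hb
      by_cases hab : a.1 = b.1
      · have : a = b := h a ha b hb hab
        subst this
        simp
      · rcases lt_or_gt_of_ne hab with hlt | hgt
        · simp [hlt, asymm hlt]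
        · simp [hgt, asymm hgt])
    xs [] (fun x hx => hx) (by simp)

-- A computes the canonical result
lemma A_eq_canonical (items : List (List (String × Int))) :
    decade_distribution items = canonical (items.filterMap extractB) := by
  set L := items.filterMap extractB with hL
  have hfold : items.foldl stepA PySem.Dict.empty = PySem.Dict.counter L := by
    rw [PySem.Dict.counter_eq_foldl]
    exact foldA_eq_counter items PySem.Dict.empty
  show PySem.List.sorted2 (items.foldl stepA PySem.Dict.empty).items (·.1) (·.2) false = _
  rw [hfold]
  rw [sorted2_eq_sorted_fst _ (by
    intro a ha b hb hab
    rw [PySem.Dict.items_counter] at ha hb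
    rcases List.mem_map.1 ha with ⟨k, _, rfl⟩
    rcases List.mem_map.1 hb with ⟨k', _, rfl⟩
    simp only at hab
    subst hab
    rfl)]
  apply PySem.List.sorted_eq_of_perm_of_pairwise_lt
  · rw [PySem.Dict.items_counter]
    exact (PySem.List.sorted_perm (PySem.Set.ofList L) (fun x => x) false).map _
  · exact (PySem.List.sorted_ofList_pairwise_lt L).map _ (by intro a b hab; simpa using hab)

-- in a key-nondecreasing list, takeWhile/dropWhile on "== x" for a lower bound x
-- are filters
lemma sorted_take_drop (x : String) (xs : List String)
    (hx : ∀ y ∈ xs, x ≤ y) (hxs : xs.Pairwise (· ≤ ·)) :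
    xs.takeWhile (fun y => y == x) = xs.filter (fun y => y == x) ∧
    xs.dropWhile (fun y => y == x) = xs.filter (fun y => !(y == x)) := by
  induction xs with
  | nil => simp
  | cons y ys ih =>
      rcases List.pairwise_cons.1 hxs with ⟨hy, hys⟩
      by_cases h : y = x
      · subst h
        have := ih (fun z hz => hx z (by simp [hz])) hys
        simp [this.1, this.2]
      · have hxy : x < y := lt_of_le_of_ne (hx y (by simp)) (Ne.symm h)
        have hne : ∀ z ∈ y :: ys, ¬(z = x) := by
          intro z hz
          rcases List.mem_cons.1 hz with rfl | hz
          · exact h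
          · exact ne_of_gt (lt_of_lt_of_le hxy (hy z hz))
        constructor
        · have hnil : List.filter (fun y => y == x) (y :: ys) = [] := by
            rw [List.filter_eq_nil_iff]; intro z hz; simpa using hne z hz
          rw [hnil, List.takeWhile_cons]
          simp [h]
        · have hall : List.filter (fun y => !(y == x)) (y :: ys) = y :: ys := by
            rw [List.filter_eq_self]; intro z hz; simpa using hne z hz
          rw [hall, List.dropWhile_cons]
          simp [h]

-- groupby over a nondecreasing list yields each distinct element, in sorted order,
-- with its multiplicity
lemma groupRuns_sorted : ∀ (M : List String), M.Pairwise (· ≤ ·) →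
    groupRuns M
      = (PySem.List.sorted (PySem.Set.ofList M) (fun x => x) false).map
          (fun k => (k, (M.count k : Int))) := by
  intro M
  induction M using groupRuns.induct with
  | case1 => intro _; simp [groupRuns]; rfl
  | case2 x xs ih =>
      intro h
      rcases List.pairwise_cons.1 h with ⟨hx, hxs⟩
      obtain ⟨htake, hdrop⟩ := sorted_take_drop x xs hx hxs
      have hmem_t : ∀ z ∈ xs.dropWhile (fun y => y == x), z ≠ x := by
        intro z hz
        rw [hdrop] at hz
        simpa using (List.mem_filter.1 hz).2
      have hsub_t : ∀ z ∈ xs.dropWhile (fun y => y == x), z ∈ xs := by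
        intro z hz; rw [hdrop] at hz; exact (List.mem_filter.1 hz).1
      have hxsmem : ∀ z ∈ xs, z = x ∨ z ∈ xs.dropWhile (fun y => y == x) := by
        intro z hz
        rw [← List.takeWhile_append_dropWhile (p := fun y => y == x) (l := xs)] at hz
        rcases List.mem_append.1 hz with hz | hz
        · left; simpa using List.mem_takeWhile_imp hz
        · right; exact hz
      -- the sorted distinct elements of x :: xs are x followed by those of the tail runs
      have hsorted :
          PySem.List.sorted (PySem.Set.ofList (x :: xs)) (fun x => x) false
            = x :: PySem.List.sorted (PySem.Set.ofList (xs.dropWhile (fun y => y == x))) (fun x => x) false := by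
        apply PySem.List.sorted_eq_of_perm_of_pairwise_lt
        · rw [List.perm_ext_iff_of_nodup]
          · intro a
            simp only [List.mem_cons, PySem.List.mem_sorted, PySem.Set.mem_ofList]
            constructor
            · rintro (rfl | ha)
              · simp
              · simp [hsub_t a ha]
            · rintro (rfl | ha)
              · simp
              · rcases hxsmem a ha with rfl | ha'
                · simp
                · simp [ha']
          · rw [List.nodup_cons]
            refine ⟨?_, ((PySem.List.sorted_perm _ _ _).nodup_iff).2 (PySem.Set.nodup_ofList _)⟩
            intro hmem
            rw [PySem.List.mem_sorted, PySem.Set.mem_ofList] at hmem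
            exact hmem_t x hmem rfl
          · exact PySem.Set.nodup_ofList (x :: xs)
        · rw [List.pairwise_cons]
          refine ⟨?_, PySem.List.sorted_ofList_pairwise_lt _⟩
          intro a ha
          rw [PySem.List.mem_sorted, PySem.Set.mem_ofList] at ha
          exact lt_of_le_of_ne (hx a (hsub_t a ha)) (Ne.symm (hmem_t a ha))
      have hcount_x : ((x :: xs).count x : Int)
          = 1 + ((xs.takeWhile (fun y => y == x)).length : Int) := by
        rw [htake, List.count_cons_self]
        have : xs.count x = (xs.filter (fun y => y == x)).length := by
          rw [List.count_eq_length_filter]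
        omega
      have hcount_t : ∀ k ∈ xs.dropWhile (fun y => y == x),
          (x :: xs).count k = (xs.dropWhile (fun y => y == x)).count k := by
        intro k hk
        have hkx : k ≠ x := hmem_t k hk
        rw [List.count_cons_of_ne (Ne.symm hkx)]
        conv_lhs => rw [← List.takeWhile_append_dropWhile (p := fun y => y == x) (l := xs)]
        rw [List.count_append]
        have : (xs.takeWhile (fun y => y == x)).count k = 0 := by
          rw [List.count_eq_zero]
          intro hkw
          exact hkx (by simpa using List.mem_takeWhile_imp hkw)
        omega
      rw [groupRuns, hsorted, List.map_cons, ← hcount_x,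
        ih (by rw [hdrop]; exact hxs.filter _)]
      congr 1
      apply List.map_congr_left
      intro k hk
      rw [PySem.List.mem_sorted, PySem.Set.mem_ofList] at hk
      rw [hcount_t k hk]

-- B computes the canonical result
lemma B_eq_canonical (items : List (List (String × Int))) :
    decade_distribution_alt items = canonical (items.filterMap extractB) := by
  set L := items.filterMap extractB with hL
  show groupRuns (PySem.List.sorted L (fun x => x) false) = canonical L
  set M := PySem.List.sorted L (fun x => x) false with hM
  have hperm : M.Perm L := PySem.List.sorted_perm L (fun x => x) false
  rw [groupRuns_sorted M (by simpa using PySem.List.sorted_pairwise L (fun x => x))]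
  have hsets : PySem.List.sorted (PySem.Set.ofList M) (fun x => x) false
      = PySem.List.sorted (PySem.Set.ofList L) (fun x => x) false := by
    apply PySem.List.sorted_eq_sorted_of_perm _ _ _ (fun a b h => h)
    rw [List.perm_ext_iff_of_nodup (PySem.Set.nodup_ofList M) (PySem.Set.nodup_ofList L)]
    intro a
    simp only [PySem.Set.mem_ofList]
    exact hperm.mem_iff
  rw [hsets]
  unfold canonical
  apply List.map_congr_left
  intro k _
  rw [hperm.count_eq]

-- ===== VERDICT (by name: the statement is the Claim_ definition above) =====
theorem decade_distribution_spec : Claim_equal_decade_distribution := by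
  intro items _
  show decade_distribution items = decade_distribution_alt items
  rw [A_eq_canonical, B_eq_canonical]
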